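-- pv_equiv track=rewrite | github.com/mcyprian/slide | slide/rotate.py | unique_prefix
-- ===== SOURCE A (Python) =====
-- import string
--
-- def unique_prefix(states):
--     pref = ""
--     act = 0
--     while True:
--         good = 1
--         for x in states:
--             if x.find(pref + string.ascii_uppercase[act]) == 0:
--                 good = 0
--                 break
--         if good:
--             return pref + string.ascii_uppercase[act]
--         if act < len(string.ascii_uppercase):
--             act = act + 1
--         else:
--             act = 0
--             pref = pref + "X"
-- ===== SOURCE B (Python) =====
-- import string
--
-- def unique_prefix(states):
--     firsts = {x[0] for x in states if x}
--     return next(c for c in string.ascii_uppercase if c not in firsts)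
-- ===== Notes on version B (the rewrite author's own statement) =====
-- stated objective: faster
-- what changed: Replaces A's per-candidate rescan of all states with one pass building a set of first characters followed by a single scan over the alphabet, so each state is read once. Pre_ excludes only the inputs where A raises IndexError (every letter A-Z is some state's first character); B raises StopIteration there.
import Mathlib
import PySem

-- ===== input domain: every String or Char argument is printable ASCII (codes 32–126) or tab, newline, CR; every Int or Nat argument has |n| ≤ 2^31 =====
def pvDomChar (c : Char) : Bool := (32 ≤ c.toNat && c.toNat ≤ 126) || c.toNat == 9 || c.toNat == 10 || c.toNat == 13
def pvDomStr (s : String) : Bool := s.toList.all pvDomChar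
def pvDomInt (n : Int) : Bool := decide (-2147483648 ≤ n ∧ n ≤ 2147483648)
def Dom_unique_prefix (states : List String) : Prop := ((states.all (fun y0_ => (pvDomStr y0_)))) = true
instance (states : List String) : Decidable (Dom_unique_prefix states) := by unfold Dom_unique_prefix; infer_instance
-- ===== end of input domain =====

-- B replaces A's per-letter rescan of all states by one pass building the set of first
-- characters followed by a single scan over the alphabet.

-- ===== PORT A =====
def pvUpper : String := "ABCDEFGHIJKLMNOPQRSTUVWXYZ"

-- literal port of A's 'while True' loop; fuel 27 covers every run, since act goes 0,1,...
-- and ascii_uppercase[26] is an IndexError (pyGet? = none, modelled as "", outside Pre_).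
def pvLoopA (states : List String) : Nat → String → Int → String
  | 0, _, _ => ""
  | fuel+1, pref, act =>
    match PySem.Str.pyGet? pvUpper act with
    | none => ""  -- IndexError: string index out of range (excluded by Pre_)
    | some c =>
      let cand := pref ++ String.ofList [c]
      if states.any (fun x => PySem.Str.find x cand == 0) then
        -- good = 0
        if act < (PySem.Str.len pvUpper : Int) then pvLoopA states fuel pref (act + 1)
        else pvLoopA states fuel (pref ++ "X") 0
      else cand

def unique_prefix (states : List String) : String := pvLoopA states 27 "" 0

-- ===== PORT B =====
def pvFirsts (states : List String) : PySem.Set Char :=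
  PySem.Set.ofList (states.filterMap (fun x => x.toList.head?))

-- next(c for c in ascii_uppercase if c not in firsts); exhaustion (StopIteration) modelled as "", outside Pre_
def pvScan (firsts : PySem.Set Char) : List Char → String
  | [] => ""
  | c :: cs => if PySem.Set.contains firsts c then pvScan firsts cs else String.ofList [c]

def unique_prefix_alt (states : List String) : String :=
  pvScan (pvFirsts states) pvUpper.toList

-- ===== PRECONDITION & SPEC =====
-- Pre_ excludes exactly the inputs on which A raises IndexError (it indexes ascii_uppercase[26]):
-- those where every letter A-Z is the first character of some state; B raises StopIteration there.
def Pre_unique_prefix (states : List String) : Prop :=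
  ("ABCDEFGHIJKLMNOPQRSTUVWXYZ".toList.any
    (fun c => states.all (fun x => x.toList.head? != some c))) = true
instance (states : List String) : Decidable (Pre_unique_prefix states) := by
  unfold Pre_unique_prefix; infer_instance

def pvWitness_unique_prefix : List String := ["APPLE", "BANANA", ""]

def Spec_unique_prefix (states : List String) (out : String) : Prop := out = unique_prefix_alt states
instance (states : List String) (out : String) : Decidable (Spec_unique_prefix states out) := by unfold Spec_unique_prefix; infer_instance

-- ===== CLAIM (what is proved, stated in full; the proofs are below) =====
def Claim_equal_unique_prefix : Prop := ∀ (states : List String), Dom_unique_prefix states → Pre_unique_prefix states → Spec_unique_prefix states (unique_prefix states)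

-- ===== LEMMAS AND PROOFS =====

-- s.find([c]) = 0 exactly when c is the first character of s
lemma pv_find_single_chars (s : List Char) (c : Char) :
    PySem.Chars.find s [c] = 0 ↔ s.head? = some c := by
  constructor
  · intro h
    have h0 : (0:Int) ≤ PySem.Chars.find s [c] := le_of_eq h.symm
    have := (PySem.Chars.find_spec h0).1
    rw [h] at this
    simp at this
    rcases this with ⟨t, ht⟩
    rw [← ht]; rfl
  · intro h
    cases s with
    | nil => simp at h
    | cons a t =>
      simp at h; subst h
      have hpre : [a] <+: (a :: t) := ⟨t, rfl⟩
      have hne : PySem.Chars.find (a :: t) [a] ≠ -1 :=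
        (PySem.Chars.find_ne_neg_one_iff _ _).mpr hpre.isInfix
      have hle := PySem.Chars.neg_one_le_find (a :: t) [a]
      have h0 : (0:Int) ≤ PySem.Chars.find (a :: t) [a] := by omega
      have hsp := (PySem.Chars.find_spec h0).2
      by_contra hne0
      have hpos : 0 < (PySem.Chars.find (a :: t) [a]).toNat := by omega
      exact hsp 0 hpos (by simpa using hpre)

-- the same, as a Bool equation on a String (A's loop test)
lemma pv_find_single (x : String) (c : Char) :
    (PySem.Str.find x (String.ofList [c]) == 0) = (x.toList.head? == some c) := by
  rw [Bool.eq_iff_iff]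
  simp [PySem.Str.find_eq, pv_find_single_chars]

-- membership in B's set of first characters = A's scan over the states
lemma pv_contains_firsts (states : List String) (c : Char) :
    PySem.Set.contains (pvFirsts states) c
      = states.any (fun x => x.toList.head? == some c) := by
  rw [Bool.eq_iff_iff, PySem.Set.contains_iff]
  simp [pvFirsts, PySem.Set.mem_ofList, List.mem_filterMap, List.any_eq_true]

lemma pv_len : pvUpper.toList.length = 26 := by decide

-- A's loop from letter position n equals B's scan of the remaining alphabet
lemma pv_loop_eq (states : List String) :
    ∀ (f n : Nat), n + f = 27 →
      pvLoopA states f "" (n : Int)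
        = pvScan (pvFirsts states) (pvUpper.toList.drop n) := by
  intro f
  induction f with
  | zero =>
    intro n hn
    have h26 : pvUpper.toList.drop n = [] :=
      List.drop_eq_nil_of_le (by rw [pv_len]; omega)
    simp [pvLoopA, h26, pvScan]
  | succ f ih =>
    intro n hn
    by_cases h26 : n = 26
    · subst h26
      have hget : PySem.List.pyGet? pvUpper.toList (26:Int) = none := by decide
      have hdrop : pvUpper.toList.drop 26 = [] := by decide
      simp [pvLoopA, hget, hdrop, pvScan]
    · have hlt : n < 26 := by omega
      have hlen : n < pvUpper.toList.length := by rw [pv_len]; exact hlt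
      have hget : PySem.Str.pyGet? pvUpper (n:Int) = some (pvUpper.toList[n]'hlen) := by
        simp [pvUpper]
      have hdrop : pvUpper.toList.drop n
          = pvUpper.toList[n]'hlen :: pvUpper.toList.drop (n+1) :=
        List.drop_eq_getElem_cons hlen
      rw [pvLoopA, hget]
      rw [hdrop, pvScan]
      simp only [String.empty_append]
      simp only [pv_find_single, ← pv_contains_firsts]
      by_cases hc : PySem.Set.contains (pvFirsts states) (pvUpper.toList[n]'hlen) = true
      · rw [if_pos hc, if_pos hc]
        rw [if_pos (by simp [pvUpper, PySem.Str.len]; omega)]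
        have : ((n:Int) + 1) = (((n+1:Nat)):Int) := by push_cast; ring
        rw [this, ih (n+1) (by omega)]
      · rw [if_neg hc, if_neg hc]

-- ===== VERDICT (by name: the statement is the Claim_ definition above) =====
theorem unique_prefix_spec : Claim_equal_unique_prefix := by
  intro states _ _
  unfold Spec_unique_prefix unique_prefix unique_prefix_alt
  simpa using pv_loop_eq states 27 0 rfl
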